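-- pv_equiv track=rewrite | github.com/sriharshaduppalli/BYSEL | backend/app/routes/__init__.py | _derive_mf_category
-- ===== SOURCE A (Python) =====
-- def _derive_mf_category(category_context: str, scheme_name: str) -> str:
--     token = f"{category_context} {scheme_name}".lower()
--     if any(word in token for word in ["index", "nifty", "sensex", "etf"]):
--         return "INDEX"
--     if any(word in token for word in ["equity", "elss", "large cap", "mid cap", "small cap", "flexi", "focused"]):
--         return "EQUITY"
--     if any(word in token for word in ["debt", "bond", "gilt", "liquid", "money market", "ultra short", "credit risk"]):
--         return "DEBT"
--     if any(word in token for word in ["hybrid", "balanced", "arbitrage", "multi asset", "asset allocation"]):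
--         return "HYBRID"
--     if any(word in token for word in ["solution", "retirement", "children"]):
--         return "SOLUTION"
--     if "fof" in token or "fund of funds" in token:
--         return "FOF"
--     return "OTHER"
-- ===== SOURCE B (Python) =====
-- # Different algorithm: instead of scanning the token once per keyword (27
-- # substring searches), enumerate every slice of the token at each start
-- # position for each possible keyword length and look it up in a hash map
-- # keyword -> category rank; the answer is the label of the minimum rank seen.
--
-- _MF_LABELS = ["INDEX", "EQUITY", "DEBT", "HYBRID", "SOLUTION", "FOF", "OTHER"]
--
-- _MF_KEYWORD_RANK = {
--     "index": 0, "nifty": 0, "sensex": 0, "etf": 0,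
--     "equity": 1, "elss": 1, "large cap": 1, "mid cap": 1, "small cap": 1,
--     "flexi": 1, "focused": 1,
--     "debt": 2, "bond": 2, "gilt": 2, "liquid": 2, "money market": 2,
--     "ultra short": 2, "credit risk": 2,
--     "hybrid": 3, "balanced": 3, "arbitrage": 3, "multi asset": 3,
--     "asset allocation": 3,
--     "solution": 4, "retirement": 4, "children": 4,
--     "fof": 5, "fund of funds": 5,
-- }
--
-- # distinct keyword lengths, ascending
-- _MF_KEYWORD_LENGTHS = [3, 4, 5, 6, 7, 8, 9, 10, 11, 12, 13, 16]
--
--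
-- def _derive_mf_category(category_context: str, scheme_name: str) -> str:
--     token = f"{category_context} {scheme_name}".lower()
--     best = 6
--     for i in range(len(token)):
--         for length in _MF_KEYWORD_LENGTHS:
--             rank = _MF_KEYWORD_RANK.get(token[i:i + length])
--             if rank is not None and rank < best:
--                 best = rank
--     return _MF_LABELS[best]
-- ===== Notes on version B (the rewrite author's own statement) =====
-- stated objective: alternative
-- what changed: Instead of running 27 per-keyword substring searches in priority order, B makes one pass over the token's start positions, looks each candidate slice (one per distinct keyword length) up in a keyword-to-rank hash map, and returns the label of the minimum rank found (6 = OTHER).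
import Mathlib
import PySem

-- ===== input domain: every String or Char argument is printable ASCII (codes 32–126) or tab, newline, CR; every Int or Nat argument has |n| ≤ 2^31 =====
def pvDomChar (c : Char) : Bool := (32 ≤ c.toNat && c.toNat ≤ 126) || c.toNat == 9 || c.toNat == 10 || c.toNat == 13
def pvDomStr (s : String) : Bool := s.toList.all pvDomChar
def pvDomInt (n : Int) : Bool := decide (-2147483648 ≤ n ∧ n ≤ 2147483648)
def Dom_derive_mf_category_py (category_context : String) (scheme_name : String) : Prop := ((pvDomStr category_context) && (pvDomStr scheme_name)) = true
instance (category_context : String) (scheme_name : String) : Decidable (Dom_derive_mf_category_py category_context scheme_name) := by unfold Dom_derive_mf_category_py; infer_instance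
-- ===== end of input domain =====

-- B replaces A's 27 ordered per-keyword substring scans by one pass over the token's
-- start positions looking candidate slices up in a keyword→rank map (alternative algorithm).

-- ===== PORT A =====
-- Port of A: six ordered if-branches, each an any-membership test on the lowercased token.
def derive_mf_category_py (category_context : String) (scheme_name : String) : String :=
  let token := PySem.Str.lower (category_context ++ " " ++ scheme_name)
  if ["index", "nifty", "sensex", "etf"].any (fun word => PySem.Str.isIn word token) then "INDEX"
  else if ["equity", "elss", "large cap", "mid cap", "small cap", "flexi", "focused"].any (fun word => PySem.Str.isIn word token) then "EQUITY"
  else if ["debt", "bond", "gilt", "liquid", "money market", "ultra short", "credit risk"].any (fun word => PySem.Str.isIn word token) then "DEBT"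
  else if ["hybrid", "balanced", "arbitrage", "multi asset", "asset allocation"].any (fun word => PySem.Str.isIn word token) then "HYBRID"
  else if ["solution", "retirement", "children"].any (fun word => PySem.Str.isIn word token) then "SOLUTION"
  else if PySem.Str.isIn "fof" token || PySem.Str.isIn "fund of funds" token then "FOF"
  else "OTHER"

-- ===== PORT B =====
-- Port of B (Source B): hash map keyword → category rank, scan every start position,
-- look up one slice per distinct keyword length, keep the minimum rank seen.
def mfLabels : List String := ["INDEX", "EQUITY", "DEBT", "HYBRID", "SOLUTION", "FOF", "OTHER"]

def mfKwRank : PySem.Dict String Nat :=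
  PySem.Dict.mk
    [("index", 0), ("nifty", 0), ("sensex", 0), ("etf", 0),
     ("equity", 1), ("elss", 1), ("large cap", 1), ("mid cap", 1), ("small cap", 1),
     ("flexi", 1), ("focused", 1),
     ("debt", 2), ("bond", 2), ("gilt", 2), ("liquid", 2), ("money market", 2),
     ("ultra short", 2), ("credit risk", 2),
     ("hybrid", 3), ("balanced", 3), ("arbitrage", 3), ("multi asset", 3),
     ("asset allocation", 3),
     ("solution", 4), ("retirement", 4), ("children", 4),
     ("fof", 5), ("fund of funds", 5)]

-- distinct keyword lengths, ascending (Source B's _MF_KEYWORD_LENGTHS)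
def mfLengths : List Nat := [3, 4, 5, 6, 7, 8, 9, 10, 11, 12, 13, 16]

-- the inner 'for length in _MF_KEYWORD_LENGTHS' loop: fold keeping the minimum rank
def mfMinFold {β : Type} (g : β → Option Nat) (l : List β) (b : Nat) : Nat :=
  l.foldl (fun b x => match g x with | some r => if r < b then r else b | none => b) b

-- the outer 'for i in range(len(token))' loop of Source B
def mfBest (token : String) : Nat :=
  (PySem.List.pyRange 0 (PySem.Str.len token) 1).foldl
    (fun b i => mfMinFold
      (fun L : Nat => mfKwRank.get? (PySem.Str.slice token (some i) (some (i + (L : Int)))))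
      mfLengths b) 6

def derive_mf_category_py_alt (category_context : String) (scheme_name : String) : String :=
  let token := PySem.Str.lower (category_context ++ " " ++ scheme_name)
  mfLabels.getD (mfBest token) ""

-- ===== PRECONDITION & SPEC =====
def Spec_derive_mf_category_py (category_context : String) (scheme_name : String) (out : String) : Prop := out = derive_mf_category_py_alt category_context scheme_name
instance (category_context : String) (scheme_name : String) (out : String) : Decidable (Spec_derive_mf_category_py category_context scheme_name out) := by unfold Spec_derive_mf_category_py; infer_instance

-- ===== CLAIM (what is proved, stated in full; the proofs are below) =====
def Claim_equal_derive_mf_category_py : Prop := ∀ (category_context : String) (scheme_name : String), Dom_derive_mf_category_py category_context scheme_name → Spec_derive_mf_category_py category_context scheme_name (derive_mf_category_py category_context scheme_name)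

-- ===== LEMMAS AND PROOFS =====

-- proof-only helpers: A's category keyword lists and its first-match index
def mfCats : List (List String) :=
  [["index", "nifty", "sensex", "etf"],
   ["equity", "elss", "large cap", "mid cap", "small cap", "flexi", "focused"],
   ["debt", "bond", "gilt", "liquid", "money market", "ultra short", "credit risk"],
   ["hybrid", "balanced", "arbitrage", "multi asset", "asset allocation"],
   ["solution", "retirement", "children"],
   ["fof", "fund of funds"]]

def mfMatch (token : String) (j : Nat) : Bool :=
  (mfCats.getD j []).any (fun w => PySem.Str.isIn w token)

def mfTarget (token : String) : Nat :=
  if mfMatch token 0 then 0 else if mfMatch token 1 then 1 else if mfMatch token 2 then 2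
  else if mfMatch token 3 then 3 else if mfMatch token 4 then 4
  else if mfMatch token 5 then 5 else 6

def mfG (token : String) (p : Int × Nat) : Option Nat :=
  mfKwRank.get? (PySem.Str.slice token (some p.1) (some (p.1 + (p.2 : Int))))

def mfPairs (token : String) : List (Int × Nat) :=
  (PySem.List.pyRange 0 (PySem.Str.len token) 1).flatMap (fun i => mfLengths.map (fun L => (i, L)))

lemma str_toList_inj {s t : String} (h : s.toList = t.toList) : s = t := by
  have := congrArg String.ofList h; simpa using this

lemma strSlice_toList (s : String) (a b : Option Int) :
    (PySem.Str.slice s a b).toList = PySem.List.slice s.toList a b := by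
  simp [PySem.Str.slice]

lemma strLen_eq (s : String) : PySem.Str.len s = (s.toList.length : Int) := by
  simp [PySem.Str.len]

lemma mfMinFold_cons {β : Type} (g : β → Option Nat) (y : β) (l : List β) (b : Nat) :
    mfMinFold g (y :: l) b
      = mfMinFold g l (match g y with | some r => if r < b then r else b | none => b) := rfl

lemma mfMinFold_append {β : Type} (g : β → Option Nat) (l1 l2 : List β) (b : Nat) :
    mfMinFold g (l1 ++ l2) b = mfMinFold g l2 (mfMinFold g l1 b) := by
  simp [mfMinFold, List.foldl_append]

lemma mfMinFold_le_init {β : Type} (g : β → Option Nat) (l : List β) (b : Nat) :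
    mfMinFold g l b ≤ b := by
  induction l generalizing b with
  | nil => exact le_rfl
  | cons y l ih =>
    rw [mfMinFold_cons]
    refine le_trans (ih _) ?_
    cases g y with
    | none => exact le_rfl
    | some r => dsimp only; split_ifs <;> omega

lemma mfMinFold_le_of_mem {β : Type} (g : β → Option Nat) {l : List β} {x : β} {r : Nat}
    (hx : x ∈ l) (hg : g x = some r) (b : Nat) : mfMinFold g l b ≤ r := by
  induction l generalizing b with
  | nil => cases hx
  | cons y l ih =>
    rw [mfMinFold_cons]
    rcases List.mem_cons.mp hx with h | h
    · subst h
      rw [hg]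
      refine le_trans (mfMinFold_le_init _ _ _) ?_
      dsimp only; split_ifs <;> omega
    · exact ih h _

lemma mfMinFold_cases {β : Type} (g : β → Option Nat) (l : List β) (b : Nat) :
    mfMinFold g l b = b ∨ ∃ x ∈ l, g x = some (mfMinFold g l b) := by
  induction l generalizing b with
  | nil => exact Or.inl rfl
  | cons y l ih =>
    rw [mfMinFold_cons]
    cases hgy : g y with
    | none =>
      rcases ih b with h | ⟨x, hx, hgx⟩
      · exact Or.inl h
      · exact Or.inr ⟨x, List.mem_cons_of_mem _ hx, hgx⟩
    | some r =>
      dsimp only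
      by_cases hr : r < b
      · rw [if_pos hr]
        rcases ih r with h | ⟨x, hx, hgx⟩
        · exact Or.inr ⟨y, List.mem_cons_self, by rw [hgy, h]⟩
        · exact Or.inr ⟨x, List.mem_cons_of_mem _ hx, hgx⟩
      · rw [if_neg hr]
        rcases ih b with h | ⟨x, hx, hgx⟩
        · exact Or.inl h
        · exact Or.inr ⟨x, List.mem_cons_of_mem _ hx, hgx⟩

lemma outer_flat (token : String) (l : List Int) (b : Nat) :
    l.foldl (fun b i => mfMinFold
        (fun L : Nat => mfKwRank.get? (PySem.Str.slice token (some i) (some (i + (L : Int)))))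
        mfLengths b) b
      = mfMinFold (mfG token) (l.flatMap (fun i => mfLengths.map (fun L => (i, L)))) b := by
  induction l generalizing b with
  | nil => rfl
  | cons i l ih =>
    rw [List.foldl_cons, ih, List.flatMap_cons, mfMinFold_append]
    congr 1

lemma mfBest_eq_minFold (token : String) :
    mfBest token = mfMinFold (mfG token) (mfPairs token) 6 := by
  unfold mfBest mfPairs
  exact outer_flat token _ 6

lemma slice_infix (s : String) (i : Int) (L : Nat) (hi : 0 ≤ i) :
    (PySem.Str.slice s (some i) (some (i + (L : Int)))).toList <:+: s.toList := by
  have hb : (0 : Int) ≤ i + (L : Int) := by positivity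
  rw [strSlice_toList, PySem.List.slice_toNat _ hi hb]
  exact ((List.take_prefix _ _).isInfix).trans ((List.drop_suffix _ _).isInfix)

lemma mem_ranks_of_isIn (token kw : String) (j : Nat)
    (hget : mfKwRank.get? kw = some j) (hlen : kw.toList.length ∈ mfLengths)
    (hne : kw.toList ≠ []) (hin : PySem.Str.isIn kw token = true) :
    ∃ p ∈ mfPairs token, mfG token p = some j := by
  obtain ⟨pre, suf, heq⟩ := (PySem.Str.isIn_iff_infix kw token).mp hin
  have hkl : 0 < kw.toList.length := List.length_pos_iff.mpr hne
  have hlens : pre.length + (kw.toList.length + suf.length) = token.toList.length := by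
    have h1 := congrArg List.length heq
    simpa using h1
  refine ⟨((pre.length : Int), kw.toList.length), ?_, ?_⟩
  · refine List.mem_flatMap.mpr ⟨(pre.length : Int), ?_, ?_⟩
    · refine PySem.List.mem_pyRange_one.mpr ⟨by positivity, ?_⟩
      rw [strLen_eq]
      exact_mod_cast (by omega : pre.length < token.toList.length)
    · exact List.mem_map.mpr ⟨kw.toList.length, hlen, rfl⟩
  · have hsl : (PySem.Str.slice token (some (pre.length : Int))
        (some ((pre.length : Int) + (kw.toList.length : Int)))).toList = kw.toList := by
      rw [strSlice_toList, PySem.List.slice_natCast_add, ← heq, List.append_assoc,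
        List.drop_left, List.take_left]
    have : PySem.Str.slice token (some (pre.length : Int))
        (some ((pre.length : Int) + (kw.toList.length : Int))) = kw := str_toList_inj hsl
    dsimp only [mfG]
    rw [this]; exact hget

lemma match_of_rank {token kw : String} {r : Nat}
    (hmem : (kw, r) ∈ mfKwRank.items) (hin : PySem.Str.isIn kw token = true) :
    mfMatch token r = true := by
  fin_cases hmem <;> simp_all [mfMatch, mfCats]

lemma mfTarget_le (token : String) (j : Nat) (hj : mfMatch token j = true) :
    mfTarget token ≤ j := by
  unfold mfTarget
  split_ifs with h0 h1 h2 h3 h4 h5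
  · exact Nat.zero_le _
  · by_contra hc; rw [Nat.not_le] at hc; interval_cases j <;> simp_all
  · by_contra hc; rw [Nat.not_le] at hc; interval_cases j <;> simp_all
  · by_contra hc; rw [Nat.not_le] at hc; interval_cases j <;> simp_all
  · by_contra hc; rw [Nat.not_le] at hc; interval_cases j <;> simp_all
  · by_contra hc; rw [Nat.not_le] at hc; interval_cases j <;> simp_all
  · by_contra hc; rw [Nat.not_le] at hc
    interval_cases j <;> simp_all

lemma mfBest_eq_target (token : String) : mfBest token = mfTarget token := by
  rw [mfBest_eq_minFold]
  apply Nat.le_antisymm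
  · -- mfMinFold ≤ target
    have htc : mfTarget token = 6 ∨ mfMatch token (mfTarget token) = true := by
      unfold mfTarget
      split_ifs with h0 h1 h2 h3 h4 h5
      all_goals first | (right; assumption) | (left; rfl)
    rcases htc with h6 | hm
    · rw [h6]; exact mfMinFold_le_init _ _ _
    · obtain ⟨kw, hkwmem, hkin⟩ := List.any_eq_true.mp hm
      have hj6 : mfTarget token < 6 := by
        by_contra h; push_neg at h
        have : mfCats.getD (mfTarget token) [] = [] :=
          List.getD_eq_default _ _ (by simp [mfCats]; omega)
        rw [this] at hkwmem; cases hkwmem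
      have hkw : mfKwRank.get? kw = some (mfTarget token) ∧
          kw.toList.length ∈ mfLengths ∧ kw.toList ≠ [] := by
        interval_cases h : mfTarget token <;> fin_cases hkwmem <;>
          refine ⟨by decide, by decide, by decide⟩
      obtain ⟨p, hp, hgp⟩ := mem_ranks_of_isIn token kw (mfTarget token) hkw.1 hkw.2.1 hkw.2.2 hkin
      exact mfMinFold_le_of_mem _ hp hgp 6
  · -- target ≤ mfMinFold
    rcases mfMinFold_cases (mfG token) (mfPairs token) 6 with h | ⟨p, hp, hgp⟩
    · rw [h]
      unfold mfTarget; split_ifs <;> omega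
    · obtain ⟨i, hi, hpair⟩ := List.mem_flatMap.mp hp
      obtain ⟨L, hL, hpe⟩ := List.mem_map.mp hpair
      have hi0 : 0 ≤ p.1 := by
        rw [← hpe]; exact (PySem.List.mem_pyRange_one.mp hi).1
      have hgp' : mfKwRank.get? (PySem.Str.slice token (some p.1) (some (p.1 + (p.2 : Int))))
          = some (mfMinFold (mfG token) (mfPairs token) 6) := hgp
      have hmem : (PySem.Str.slice token (some p.1) (some (p.1 + (p.2 : Int))),
          mfMinFold (mfG token) (mfPairs token) 6) ∈ mfKwRank.items :=
        PySem.Dict.mem_items_of_get?_eq_some _ hgp'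
      have hisin : PySem.Str.isIn
          (PySem.Str.slice token (some p.1) (some (p.1 + (p.2 : Int)))) token = true :=
        (PySem.Str.isIn_iff_infix _ _).mpr (slice_infix token p.1 p.2 hi0)
      exact mfTarget_le token _ (match_of_rank hmem hisin)

-- ===== VERDICT (by name: the statement is the Claim_ definition above) =====
theorem derive_mf_category_py_spec : Claim_equal_derive_mf_category_py := by
  intro category_context scheme_name _
  unfold Spec_derive_mf_category_py derive_mf_category_py derive_mf_category_py_alt
  simp only [mfBest_eq_target]
  set token := PySem.Str.lower (category_context ++ " " ++ scheme_name) with htok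
  have e0 : (["index", "nifty", "sensex", "etf"].any fun word => PySem.Str.isIn word token) = mfMatch token 0 := by
    simp [mfMatch, mfCats]
  have e1 : (["equity", "elss", "large cap", "mid cap", "small cap", "flexi", "focused"].any fun word => PySem.Str.isIn word token) = mfMatch token 1 := by
    simp [mfMatch, mfCats]
  have e2 : (["debt", "bond", "gilt", "liquid", "money market", "ultra short", "credit risk"].any fun word => PySem.Str.isIn word token) = mfMatch token 2 := by
    simp [mfMatch, mfCats]
  have e3 : (["hybrid", "balanced", "arbitrage", "multi asset", "asset allocation"].any fun word => PySem.Str.isIn word token) = mfMatch token 3 := by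
    simp [mfMatch, mfCats]
  have e4 : (["solution", "retirement", "children"].any fun word => PySem.Str.isIn word token) = mfMatch token 4 := by
    simp [mfMatch, mfCats]
  have e5 : (PySem.Str.isIn "fof" token || PySem.Str.isIn "fund of funds" token) = mfMatch token 5 := by
    simp [mfMatch, mfCats]
  rw [e0, e1, e2, e3, e4, e5]
  unfold mfTarget
  split_ifs <;> rfl
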